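-- pv_equiv track=rewrite | github.com/sanoooavi/cyberSecurityHw | CRX/cipher.py | simplified_rcx_key_schedule
-- ===== SOURCE A (Python) =====
-- def simplified_rcx_key_schedule(K, w, r):
--     P_w = 0xB7E15163
--     Q_w = 0x9E3779B9
--
--     u = w // 8  # u=4
--     b = len(K)  # b =16 byte or 128 bit
--     c = (b + u - 1) // u  # c= 4
--     t = 2 * (r + 1)  # number of sub_keys , t= 26, r=round key
--
--     L = [0] * c  # array of length 4
--     for i in range(b - 1, -1, -1):  # i from 15 to 0
--         L[i // u] = (L[i // u] << 8) + K[i]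
--     # L[3]=K[15]K[14]K[13]K[12],  L[2]=K[11]K[10]K[9]K[8],  L[1]=K[7]K[6]K[5]K[4], L[0]=K[3]K[2]K[1]K[0]
--
--     S = [0] * t
--     S[0] = P_w
--     # 1<<w is 1 with 32 zeroes = 2^32
--     for i in range(1, t):
--         S[i] = (S[i - 1] + Q_w) % (1 << w)
--
--     for i in range(t):
--         S[i] = (S[i] + L[i % c]) % (1 << w)
--
--     return S
-- ===== SOURCE B (Python) =====
-- def simplified_rcx_key_schedule(K, w, r):
--     # Closed-form one-pass version: L[j] is the little-endian base-256 value of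
--     # the j-th chunk of K, and S[i] = (P_w + i*Q_w + L[i % c]) mod 2^w directly,
--     # instead of the cumulative recurrence plus a second mixing pass.
--     P_w = 0xB7E15163
--     Q_w = 0x9E3779B9
--     u = w // 8
--     b = len(K)
--     c = (b + u - 1) // u
--     t = 2 * (r + 1)
--     L = [sum(K[j * u + k] << (8 * k) for k in range(min(u, b - j * u)))
--          for j in range(c)]
--     return [(P_w + i * Q_w + L[i % c]) % (1 << w) for i in range(t)]
-- ===== Notes on version B (the rewrite author's own statement) =====
-- stated objective: simpler
-- what changed: A's three loops (descending shift-and-add mutation of L, the cumulative S[i]=(S[i-1]+Q)%2^w recurrence, and a second in-place mixing pass over S) are replaced by two comprehensions: each L chunk is a direct positional sum of its bytes, and S is produced in one closed-form pass as (P + i*Q + L[i % c]) % 2^w.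
import Mathlib
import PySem

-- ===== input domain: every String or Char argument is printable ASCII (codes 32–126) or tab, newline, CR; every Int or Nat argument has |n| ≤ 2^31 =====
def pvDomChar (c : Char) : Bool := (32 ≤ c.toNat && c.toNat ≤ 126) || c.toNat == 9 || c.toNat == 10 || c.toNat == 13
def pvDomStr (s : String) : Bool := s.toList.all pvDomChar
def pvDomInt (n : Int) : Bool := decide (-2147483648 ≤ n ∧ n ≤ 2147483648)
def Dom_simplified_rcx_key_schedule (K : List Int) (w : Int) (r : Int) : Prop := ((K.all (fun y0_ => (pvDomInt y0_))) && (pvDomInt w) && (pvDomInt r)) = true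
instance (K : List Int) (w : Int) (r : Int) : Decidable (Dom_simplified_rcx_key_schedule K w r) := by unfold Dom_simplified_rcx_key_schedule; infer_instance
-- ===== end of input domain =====

-- B replaces A's cumulative S recurrence and second mixing pass by one closed-form
-- indexed pass (S[i] = (P + i*Q + L[i % c]) mod 2^w) and builds each L chunk by a
-- direct positional sum instead of A's descending shift-and-add mutation loop.

-- ===== PORT A =====
-- '<< 8' is ported as '* 2 ^ 8' and '1 << w' as '2 ^ w.toNat' (exact for w ≥ 0;
-- Pre_ gives 8 ≤ w).  '[0] * n' is 'List.replicate n.toNat 0' (negative n gives []).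
def simplified_rcx_key_schedule (K : List Int) (w : Int) (r : Int) : List Int :=
  let P : Int := 0xB7E15163
  let Q : Int := 0x9E3779B9
  let u : Int := PySem.Int.floordiv w 8
  let b : Int := PySem.List.len K
  let c : Int := PySem.Int.floordiv (b + u - 1) u
  let t : Int := 2 * (r + 1)
  let L : List Int := (PySem.List.pyRange (b - 1) (-1) (-1)).foldl
    (fun Lacc i =>
      PySem.List.pySetD Lacc (PySem.Int.floordiv i u)
        (PySem.List.pyGetD Lacc (PySem.Int.floordiv i u) 0 * 2 ^ 8 + PySem.List.pyGetD K i 0))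
    (List.replicate c.toNat 0)
  let S0 : List Int := PySem.List.pySetD (List.replicate t.toNat 0) 0 P
  let S1 : List Int := (PySem.List.pyRange 1 t).foldl
    (fun Sacc i =>
      PySem.List.pySetD Sacc i
        (PySem.Int.mod (PySem.List.pyGetD Sacc (i - 1) 0 + Q) (2 ^ w.toNat))) S0
  (PySem.List.pyRange 0 t).foldl
    (fun Sacc i =>
      PySem.List.pySetD Sacc i
        (PySem.Int.mod (PySem.List.pyGetD Sacc i 0 + PySem.List.pyGetD L (PySem.Int.mod i c) 0)
          (2 ^ w.toNat))) S1

-- ===== PORT B =====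
-- 'x << (8*k)' is '* 2 ^ (8 * k.toNat)' and '1 << w' is '2 ^ w.toNat' (exact for
-- the nonnegative shifts B uses under Pre_).
def simplified_rcx_key_schedule_alt (K : List Int) (w : Int) (r : Int) : List Int :=
  let P : Int := 0xB7E15163
  let Q : Int := 0x9E3779B9
  let u : Int := PySem.Int.floordiv w 8
  let b : Int := PySem.List.len K
  let c : Int := PySem.Int.floordiv (b + u - 1) u
  let t : Int := 2 * (r + 1)
  let L : List Int := (PySem.List.pyRange 0 c).map (fun j =>
    (PySem.List.pyRange 0 (min u (b - j * u))).foldl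
      (fun acc k => acc + PySem.List.pyGetD K (j * u + k) 0 * 2 ^ (8 * k.toNat)) 0)
  (PySem.List.pyRange 0 t).map (fun i =>
    PySem.Int.mod (P + i * Q + PySem.List.pyGetD L (PySem.Int.mod i c) 0) (2 ^ w.toNat))

-- ===== PRECONDITION & SPEC =====
-- Pre_ is exactly where A returns: w ≥ 8 (otherwise w//8 ≤ 0 and A hits a
-- ZeroDivisionError or an IndexError), r ≥ 0 (otherwise S[0] = P_w is an
-- IndexError on the empty S), and K nonempty (otherwise i % c divides by zero).
def Pre_simplified_rcx_key_schedule (K : List Int) (w : Int) (r : Int) : Prop :=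
  8 ≤ w ∧ 0 ≤ r ∧ K ≠ []
instance (K : List Int) (w : Int) (r : Int) : Decidable (Pre_simplified_rcx_key_schedule K w r) := by unfold Pre_simplified_rcx_key_schedule; infer_instance
def pvWitness_simplified_rcx_key_schedule : List Int × Int × Int := ([1, 2, 3, 4, 5], 8, 2)

-- (Outside Pre_: on w ≥ 8, K nonempty but r < 0, A raises IndexError while B returns [].)

def Spec_simplified_rcx_key_schedule (K : List Int) (w : Int) (r : Int) (out : List Int) : Prop := out = simplified_rcx_key_schedule_alt K w r
instance (K : List Int) (w : Int) (r : Int) (out : List Int) : Decidable (Spec_simplified_rcx_key_schedule K w r out) := by unfold Spec_simplified_rcx_key_schedule; infer_instance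

-- ===== CLAIM (what is proved, stated in full; the proofs are below) =====
def Claim_equal_simplified_rcx_key_schedule : Prop := ∀ (K : List Int) (w : Int) (r : Int), Dom_simplified_rcx_key_schedule K w r → Pre_simplified_rcx_key_schedule K w r → Spec_simplified_rcx_key_schedule K w r (simplified_rcx_key_schedule K w r)
-- ===== LEMMAS AND PROOFS =====

/-- Little-endian base-2^8 value of the K-bytes at positions lo, lo+1, …, hi-1. -/
def pvChunk (K : List Int) (lo hi : Nat) : Int :=
  ((List.range (hi - lo)).map (fun k => K.getD (lo + k) 0 * 2 ^ (8 * k))).sum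

theorem pvChunk_zero (K : List Int) (lo hi : Nat) (h : hi ≤ lo) : pvChunk K lo hi = 0 := by
  simp [pvChunk, Nat.sub_eq_zero_of_le h]

theorem pvChunk_cons (K : List Int) (lo hi : Nat) (h : lo < hi) :
    pvChunk K lo hi = pvChunk K (lo + 1) hi * 2 ^ 8 + K.getD lo 0 := by
  unfold pvChunk
  obtain ⟨n, hn⟩ : ∃ n, hi - lo = n + 1 := ⟨hi - lo - 1, by omega⟩
  have hn' : hi - (lo + 1) = n := by omega
  rw [hn, hn', List.range_succ_eq_map]
  simp only [List.map_cons, List.map_map, List.sum_cons]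
  have hfun : List.map ((fun k => K.getD (lo + k) 0 * 2 ^ (8 * k)) ∘ Nat.succ) (List.range n)
      = List.map (fun k => K.getD (lo + 1 + k) 0 * 2 ^ (8 * k) * 2 ^ 8) (List.range n) := by
    apply List.map_congr_left
    intro k _
    have h1 : lo + k.succ = lo + 1 + k := by omega
    simp only [Function.comp, h1, Nat.succ_eq_add_one]
    ring
  rw [hfun, List.sum_map_mul_right]
  simp
  ring

theorem pv_set_map_range {β : Type} (f : Nat → β) (n j0 : Nat) (v : β) :
    ((List.range n).map f).set j0 v = (List.range n).map (fun j => if j = j0 then v else f j) := by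
  apply List.ext_getElem (by simp)
  intro i h1 h2
  rw [List.getElem_set]
  simp only [List.getElem_map, List.getElem_range]
  by_cases hij : j0 = i
  · subst hij; simp
  · rw [if_neg hij, if_neg (fun h => hij h.symm)]

theorem pv_lt_div_succ_mul (a b : Nat) (hb : 0 < b) : a < (a / b + 1) * b := by
  conv_lhs => rw [← Nat.div_add_mod a b]
  calc b * (a / b) + a % b < b * (a / b) + b := Nat.add_lt_add_left (Nat.mod_lt a hb) _
    _ = (a / b + 1) * b := by ring

theorem pvLA (K : List Int) (un bn cn : Nat) (hun : 1 ≤ un)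
    (hbc : bn ≤ cn * un) :
    ∀ m, m ≤ bn →
    ((List.range m).map (fun (k : Nat) => ((bn : Int) - 1 - (k : Int)))).foldl
      (fun Lacc i =>
        PySem.List.pySetD Lacc (PySem.Int.floordiv i (un : Int))
          (PySem.List.pyGetD Lacc (PySem.Int.floordiv i (un : Int)) 0 * 2 ^ 8
            + PySem.List.pyGetD K i 0))
      (List.replicate cn 0)
    = (List.range cn).map (fun j => pvChunk K (max (bn - m) (j * un)) (min bn ((j + 1) * un))) := by
  intro m
  induction m with
  | zero =>
    intro _
    simp only [List.range_zero, List.map_nil, List.foldl_nil]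
    apply List.ext_getElem (by simp)
    intro i h1 h2
    simp only [List.getElem_replicate, List.getElem_map, List.getElem_range, Nat.sub_zero]
    rw [pvChunk_zero K _ _ (le_trans (min_le_left _ _) (Nat.le_max_left _ _))]
  | succ m ih =>
    intro hle
    have hmbn : m < bn := by omega
    set i : Nat := bn - 1 - m with hi
    have hiv : (bn : Int) - 1 - (m : Int) = (i : Nat) := by omega
    set j0 : Nat := i / un with hj0
    have hj0c : j0 < cn := (Nat.div_lt_iff_lt_mul (by omega)).mpr (by omega)
    have hj0l : j0 * un ≤ i := Nat.div_mul_le_self i un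
    have hj0r : i < (j0 + 1) * un := pv_lt_div_succ_mul i un (by omega)
    rw [List.range_succ, List.map_append, List.foldl_append, ih (by omega)]
    simp only [List.map_cons, List.map_nil, List.foldl_cons, List.foldl_nil]
    rw [hiv, PySem.Int.floordiv_natCast, ← hj0,
        PySem.List.pyGetD_natCast K i 0,
        PySem.List.pyGetD_natCast _ j0 0,
        PySem.List.pySetD_natCast,
        List.getD_eq_getElem _ _ (by simp [hj0c]),
        pv_set_map_range]
    simp only [List.getElem_map, List.getElem_range]
    apply List.map_congr_left
    intro j hj
    simp only [List.mem_range] at hj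
    have hK0 : K.getD i 0 = PySem.List.pyGetD K (i : Int) 0 := (PySem.List.pyGetD_natCast K i 0).symm
    by_cases hjj : j = j0
    · rw [if_pos hjj, hjj]
      have hmax1 : max (bn - m) (j0 * un) = i + 1 := by omega
      have hmax2 : max (bn - (m + 1)) (j0 * un) = i := by omega
      rw [hmax1, hmax2, pvChunk_cons K i _ (by omega)]
    · rw [if_neg hjj]
      rcases Nat.lt_or_ge j j0 with hlt | hge
      · have h1 : (j + 1) * un ≤ j0 * un := Nat.mul_le_mul_right un hlt
        rw [pvChunk_zero _ _ _ (by omega), pvChunk_zero _ _ _ (by omega)]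
      · have hgt : j0 + 1 ≤ j := by omega
        have h1 : (j0 + 1) * un ≤ j * un := Nat.mul_le_mul_right un hgt
        have hmax1 : max (bn - m) (j * un) = j * un := by omega
        have hmax2 : max (bn - (m + 1)) (j * un) = j * un := by omega
        rw [hmax1, hmax2]

theorem pvBchunk (K : List Int) (un bn : Nat) (jn : Nat) (hj : jn * un < bn) :
    (PySem.List.pyRange 0 (min (un : Int) ((bn : Int) - (jn : Int) * (un : Int)))).foldl
      (fun acc k => acc + PySem.List.pyGetD K ((jn : Int) * (un : Int) + k) 0 * 2 ^ (8 * k.toNat)) 0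
    = pvChunk K (jn * un) (min bn ((jn + 1) * un)) := by
  have hcast : min (un : Int) ((bn : Int) - (jn : Int) * (un : Int))
      = ((min un (bn - jn * un) : Nat) : Int) := by
    push_cast [Nat.cast_sub (le_of_lt hj)]
    norm_num
  rw [hcast, PySem.List.pyRange_zero_nat]
  rw [PySem.List.foldl_add]
  simp only [List.map_map]
  have hlen : min bn ((jn + 1) * un) - jn * un = min un (bn - jn * un) := by
    have h1 : (jn + 1) * un = jn * un + un := by ring
    generalize jn * un = p at *
    omega
  unfold pvChunk
  rw [hlen, zero_add]
  apply congrArg List.sum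
  apply List.map_congr_left
  intro k _
  simp only [Function.comp_apply, Int.toNat_natCast]
  rw [show (jn : Int) * (un : Int) + (k : Int) = ((jn * un + k : Nat) : Int) by push_cast; ring,
      PySem.List.pyGetD_natCast]

theorem pvModAdd (M a x : Int) (hM : 0 < M) :
    PySem.Int.mod (PySem.Int.mod a M + x) M = PySem.Int.mod (a + x) M := by
  rw [PySem.Int.mod_eq_emod_of_pos hM, PySem.Int.mod_eq_emod_of_pos hM,
      PySem.Int.mod_eq_emod_of_pos hM, Int.emod_add_emod]


theorem pvS1loop (P Q M : Int) (hM : 0 < M) (tn : Nat) :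
    ∀ m, 1 ≤ m → m ≤ tn →
    (PySem.List.pyRange 1 (m : Int)).foldl
      (fun Sacc i =>
        PySem.List.pySetD Sacc i
          (PySem.Int.mod (PySem.List.pyGetD Sacc (i - 1) 0 + Q) M))
      (PySem.List.pySetD (List.replicate tn 0) 0 P)
    = (List.range tn).map (fun i =>
        if i = 0 then P else if i < m then PySem.Int.mod (P + (i : Int) * Q) M else 0) := by
  intro m
  induction m with
  | zero => omega
  | succ m ih =>
    intro _ hle
    by_cases hm : m = 0
    · subst hm
      rw [show ((1:Nat) : Int) = 1 by norm_num, PySem.List.pyRange_one_eq_nil le_rfl]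
      rw [show PySem.List.pySetD (List.replicate tn (0:Int)) 0 P
            = PySem.List.pySetD (List.replicate tn (0:Int)) ((0:Nat) : Int) P by norm_num,
          PySem.List.pySetD_natCast]
      simp only [List.foldl_nil]
      apply List.ext_getElem (by simp)
      intro i h1 h2
      rw [List.getElem_set]
      simp only [List.getElem_map, List.getElem_range, List.getElem_replicate]
      by_cases h0 : 0 = i
      · subst h0; simp
      · rw [if_neg h0, if_neg (fun h => h0 h.symm), if_neg (by omega)]
    · have hm1 : 1 ≤ m := by omega
      have hmtn : m < tn := by omega
      rw [show ((m + 1 : Nat) : Int) = (m : Int) + 1 by push_cast; ring,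
          PySem.List.pyRange_one_succ_right (by exact_mod_cast hm1),
          List.foldl_append, ih hm1 (by omega)]
      simp only [List.foldl_cons, List.foldl_nil]
      rw [show ((m : Int) - 1) = ((m - 1 : Nat) : Int) by push_cast [hm1]; ring]
      rw [PySem.List.pyGetD_natCast, List.getD_eq_getElem _ _ (by simp; omega)]
      simp only [List.getElem_map, List.getElem_range]
      rw [show PySem.List.pySetD _ (m : Int) _ = _ from PySem.List.pySetD_natCast _ m _,
          pv_set_map_range]
      apply List.map_congr_left
      intro j hj
      by_cases hjm : j = m
      · have hj0 : ¬ j = 0 := by rw [hjm]; exact hm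
        have hjlt : j < m + 1 := by rw [hjm]; exact Nat.lt_succ_self m
        rw [if_pos hjm, if_neg hj0, if_pos hjlt, hjm]
        by_cases h1 : m - 1 = 0
        · have : m = 1 := by omega
          subst this
          simp
        · rw [if_neg h1, if_pos (by omega), pvModAdd _ _ _ hM]
          congr 1
          have : ((m - 1 : Nat) : Int) = (m : Int) - 1 := by push_cast [hm1]; ring
          rw [this]; ring
      · rw [if_neg hjm]
        by_cases hj0 : j = 0
        · simp [hj0]
        · rw [if_neg hj0, if_neg hj0]
          by_cases hjm' : j < m
          · rw [if_pos hjm', if_pos (by omega)]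
          · rw [if_neg hjm', if_neg (by omega)]

theorem pvS2loop (M : Int) (LB : List Int) (cn tn : Nat) (F : Nat → Int) :
    ∀ m, m ≤ tn →
    (PySem.List.pyRange 0 (m : Int)).foldl
      (fun Sacc i =>
        PySem.List.pySetD Sacc i
          (PySem.Int.mod (PySem.List.pyGetD Sacc i 0
            + PySem.List.pyGetD LB (PySem.Int.mod i (cn : Int)) 0) M))
      ((List.range tn).map F)
    = (List.range tn).map (fun i =>
        if i < m then PySem.Int.mod (F i + PySem.List.pyGetD LB ((i % cn : Nat) : Int) 0) M
        else F i) := by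
  intro m
  induction m with
  | zero =>
    intro _
    rw [show ((0:Nat) : Int) = 0 by norm_num, PySem.List.pyRange_one_eq_nil le_rfl]
    simp only [List.foldl_nil]
    apply List.map_congr_left
    intro j _
    rw [if_neg (by omega)]
  | succ m ih =>
    intro hle
    rw [show ((m + 1 : Nat) : Int) = (m : Int) + 1 by push_cast; ring,
        PySem.List.pyRange_one_succ_right (by positivity),
        List.foldl_append, ih (by omega)]
    simp only [List.foldl_cons, List.foldl_nil]
    rw [PySem.List.pyGetD_natCast, List.getD_eq_getElem _ _ (by simp; omega)]
    simp only [List.getElem_map, List.getElem_range]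
    rw [if_neg (by omega), PySem.Int.mod_natCast,
        show PySem.List.pySetD _ (m : Int) _ = _ from PySem.List.pySetD_natCast _ m _,
        pv_set_map_range]
    apply List.map_congr_left
    intro j _
    by_cases hjm : j = m
    · rw [if_pos hjm, if_pos (by omega), hjm]
    · rw [if_neg hjm]
      by_cases hjm' : j < m
      · rw [if_pos hjm', if_pos (by omega)]
      · rw [if_neg hjm', if_neg (by omega)]

theorem pv_main (K : List Int) (w : Int) (r : Int)
    (hw : 8 ≤ w) (hr : 0 ≤ r) (hK : K ≠ []) :
    simplified_rcx_key_schedule K w r = simplified_rcx_key_schedule_alt K w r := by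
  have h8 : (0:Int) < 8 := by norm_num
  set un : Nat := (w / 8).toNat with hun_def
  have h_u : PySem.Int.floordiv w 8 = (un : Int) := by
    rw [PySem.Int.floordiv_eq_ediv_of_pos h8]; omega
  have hun : 1 ≤ un := by omega
  set bn : Nat := K.length with hbn_def
  have hbn1 : 1 ≤ bn := List.length_pos_iff.mpr hK
  have h_b : PySem.List.len K = (bn : Int) := by simp [hbn_def]
  set cn : Nat := (bn - 1) / un + 1 with hcn_def
  have h_c : PySem.Int.floordiv ((bn : Int) + (un : Int) - 1) (un : Int) = (cn : Int) := by
    rw [show (bn : Int) + (un : Int) - 1 = ((bn - 1 + un : Nat) : Int) by push_cast; omega,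
        PySem.Int.floordiv_natCast]
    rw [Nat.add_div_right _ (by omega)]
  have hbc : bn ≤ cn * un := by
    have h2 := pv_lt_div_succ_mul (bn - 1) un (by omega)
    rw [← hcn_def] at h2
    generalize cn * un = X at h2 ⊢
    omega
  have hjlt : ∀ j, j < cn → j * un < bn := by
    intro j hj
    calc j * un ≤ ((bn - 1) / un) * un := Nat.mul_le_mul_right un (by omega)
      _ ≤ bn - 1 := Nat.div_mul_le_self _ _
      _ < bn := by omega
  set tn : Nat := (2 * (r + 1)).toNat with htn_def
  have h_t : (2 : Int) * (r + 1) = (tn : Int) := by omega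
  have htn2 : 2 ≤ tn := by omega
  set M : Int := 2 ^ w.toNat with hM_def
  have hM : 0 < M := by positivity
  simp only [simplified_rcx_key_schedule, simplified_rcx_key_schedule_alt,
    h_u, h_b, h_c, h_t, ← hM_def, Int.toNat_natCast]
  rw [PySem.List.pyRange_neg_one,
      show (((bn : Int) - 1) - (-1)).toNat = bn by omega,
      pvLA K un bn cn hun hbc bn le_rfl]
  simp only [Nat.sub_self, Nat.zero_max]
  rw [pvS1loop (0xB7E15163) (0x9E3779B9) M hM tn tn (by omega) le_rfl]
  rw [pvS2loop M _ cn tn _ tn le_rfl,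
      PySem.List.pyRange_zero_nat cn, PySem.List.pyRange_zero_nat tn,
      List.map_map, List.map_map]
  have hLB : (List.range cn).map
        ((fun (j : Int) =>
          (PySem.List.pyRange 0 (min (un : Int) ((bn : Int) - j * (un : Int)))).foldl
            (fun acc k => acc + PySem.List.pyGetD K (j * (un : Int) + k) 0 * 2 ^ (8 * k.toNat)) 0)
          ∘ (fun (k : Nat) => (k : Int)))
      = (List.range cn).map (fun j => pvChunk K (j * un) (min bn ((j + 1) * un))) := by
    apply List.map_congr_left
    intro j hj
    simp only [Function.comp_apply]
    exact pvBchunk K un bn j (hjlt j (List.mem_range.mp hj))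
  rw [hLB]
  apply List.map_congr_left
  intro i hi
  simp only [Function.comp_apply]
  rw [PySem.Int.mod_natCast i cn, if_pos (List.mem_range.mp hi)]
  by_cases hi0 : i = 0
  · subst hi0
    norm_num
  · rw [if_neg hi0, if_pos (List.mem_range.mp hi), pvModAdd _ _ _ hM]

-- ===== VERDICT (by name: the statement is the Claim_ definition above) =====
theorem simplified_rcx_key_schedule_spec : Claim_equal_simplified_rcx_key_schedule := by
  intro K w r _hDom hPre
  obtain ⟨hw, hr, hK⟩ := hPre
  exact pv_main K w r hw hr hK
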